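-- pv_equiv track=rewrite | github.com/Michelkroon-bit/leren-programeren | test copy.py | always_true_with_flick
-- ===== SOURCE A (Python) =====
-- def always_true_with_flick(lijst):
--     omgekeerd = True
--     result = []
--     for item in lijst:
--         if item == 'flick':
--             omgekeerd = False
--         result.append(not omgekeerd)
--         if omgekeerd:
--             omgekeerd = True
--     return result
-- ===== SOURCE B (Python) =====
-- def always_true_with_flick(lijst):
--     items = list(lijst)
--     idx = len(items)
--     for i, item in enumerate(items):
--         if item == 'flick':
--             idx = i
--             break
--     return [False] * idx + [True] * (len(items) - idx)
-- ===== Notes on version B (the rewrite author's own statement) =====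
-- stated objective: simpler
-- what changed: Replaces the per-element latching-flag loop (with its redundant flag reset) by find-the-first-'flick'-index then construct [False]*idx + [True]*(rest) via list repetition.
import Mathlib
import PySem

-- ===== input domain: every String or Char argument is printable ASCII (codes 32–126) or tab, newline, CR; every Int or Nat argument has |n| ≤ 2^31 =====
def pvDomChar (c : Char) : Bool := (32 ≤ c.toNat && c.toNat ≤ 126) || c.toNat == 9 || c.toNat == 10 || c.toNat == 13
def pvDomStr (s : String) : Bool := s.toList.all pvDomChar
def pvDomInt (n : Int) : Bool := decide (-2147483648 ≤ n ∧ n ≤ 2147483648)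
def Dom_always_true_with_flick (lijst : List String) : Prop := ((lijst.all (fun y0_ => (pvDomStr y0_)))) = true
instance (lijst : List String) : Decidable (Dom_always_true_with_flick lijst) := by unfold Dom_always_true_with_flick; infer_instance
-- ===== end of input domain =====

-- B replaces A's latching-flag single pass by find-first-'flick'-index then direct construction via replicate; objective: simpler.


-- ===== PORT A =====
-- transliteration of A's loop: state (omgekeerd, result), per item: set flag on 'flick',
-- append (not flag), then the (vacuous) 'if omgekeerd: omgekeerd = True'
def always_true_with_flick (lijst : List String) : List Bool :=
  (lijst.foldl (fun (s : Bool × List Bool) item =>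
    let omg := if item == "flick" then false else s.1
    let res := s.2 ++ [!omg]
    let omg := if omg then true else omg
    (omg, res)) (true, [])).2

-- ===== PORT B =====
-- first phase of Source B: index of the first 'flick', or length if none
def flickIdx : List String → Nat
  | [] => 0
  | x :: xs => if x == "flick" then 0 else 1 + flickIdx xs

def always_true_with_flick_alt (lijst : List String) : List Bool :=
  let idx := flickIdx lijst
  List.replicate idx false ++ List.replicate (lijst.length - idx) true

-- ===== PRECONDITION & SPEC =====
def Spec_always_true_with_flick (lijst : List String) (out : List Bool) : Prop := out = always_true_with_flick_alt lijst
instance (lijst : List String) (out : List Bool) : Decidable (Spec_always_true_with_flick lijst out) := by unfold Spec_always_true_with_flick; infer_instance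

-- ===== CLAIM (what is proved, stated in full; the proofs are below) =====
def Claim_equal_always_true_with_flick : Prop := ∀ (lijst : List String), Dom_always_true_with_flick lijst → Spec_always_true_with_flick lijst (always_true_with_flick lijst)

-- ===== LEMMAS AND PROOFS =====
def pvStep : Bool × List Bool → String → Bool × List Bool :=
  fun s item =>
    let omg := if item == "flick" then false else s.1
    let res := s.2 ++ [!omg]
    let omg := if omg then true else omg
    (omg, res)

-- once the flag is false, every remaining element yields true
theorem pvStep_false (acc : List Bool) (x : String) :
    pvStep (false, acc) x = (false, acc ++ [true]) := by
  by_cases h : x == "flick" <;> simp [pvStep, h]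

theorem foldl_false (l : List String) (acc : List Bool) :
    l.foldl pvStep (false, acc) = (false, acc ++ List.replicate l.length true) := by
  induction l generalizing acc with
  | nil => simp
  | cons x xs ih =>
      rw [List.foldl_cons, pvStep_false, ih]
      simp [List.replicate_succ, List.append_assoc]

-- with the flag still true, the fold contributes false up to the first 'flick', then true
theorem foldl_true (l : List String) (acc : List Bool) :
    l.foldl pvStep (true, acc) =
      ((flickIdx l == l.length),
        acc ++ (List.replicate (flickIdx l) false ++ List.replicate (l.length - flickIdx l) true)) := by
  induction l generalizing acc with
  | nil => simp [flickIdx]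
  | cons x xs ih =>
      simp only [List.foldl_cons, pvStep, flickIdx]
      by_cases hx : x == "flick"
      · simp [hx, foldl_false, List.replicate_succ, List.append_assoc]
      · have hlen : 1 + flickIdx xs - (xs.length + 1) = flickIdx xs - xs.length := by omega
        have hflag : (flickIdx xs == xs.length) = (1 + flickIdx xs == xs.length + 1) := by
          simp; omega
        simp [hx, ih, hflag]
        rw [show (1 : Nat) + flickIdx xs = flickIdx xs + 1 by omega,
            show xs.length + 1 - (flickIdx xs + 1) = xs.length - flickIdx xs by omega,
            List.replicate_succ]
        simp

-- ===== VERDICT (by name: the statement is the Claim_ definition above) =====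
theorem always_true_with_flick_spec : Claim_equal_always_true_with_flick := by
  intro lijst _
  show _ = _
  unfold always_true_with_flick always_true_with_flick_alt
  rw [show (fun (s : Bool × List Bool) item =>
    let omg := if item == "flick" then false else s.1
    let res := s.2 ++ [!omg]
    let omg := if omg then true else omg
    (omg, res)) = pvStep from rfl, foldl_true]
  simp
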